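-- pv_equiv track=rewrite | github.com/emiflair/TFTmodelAI | src/training/train_tft.py | _determine_feature_groups
-- ===== SOURCE A (Python) =====
-- from typing import Dict, List, Sequence, Tuple
--
-- def _determine_feature_groups(feature_columns: Sequence[str]) -> Tuple[List[str], List[str]]:
--     known_future = [
--         col
--         for col in feature_columns
--         if col.startswith("hour_") or col.startswith("dow_") or col.startswith("session_")
--     ]
--     unknown = [col for col in feature_columns if col not in known_future]
--     return known_future, unknown
-- ===== SOURCE B (Python) =====
-- from typing import List, Sequence, Tuple
--
-- def _determine_feature_groups(feature_columns: Sequence[str]) -> Tuple[List[str], List[str]]: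
--     known_future: List[str] = []
--     unknown: List[str] = []
--     for col in feature_columns:
--         if col.startswith("hour_") or col.startswith("dow_") or col.startswith("session_"):
--             known_future.append(col)
--         else:
--             unknown.append(col)
--     return known_future, unknown
-- ===== Notes on version B (the rewrite author's own statement) =====
-- stated objective: simpler
-- what changed: Replaced A's two scans (build known_future, then re-scan feature_columns testing list membership against known_future) with a single partitioning pass that evaluates the prefix predicate once per column and appends to the proper list.
import Mathlib
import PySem

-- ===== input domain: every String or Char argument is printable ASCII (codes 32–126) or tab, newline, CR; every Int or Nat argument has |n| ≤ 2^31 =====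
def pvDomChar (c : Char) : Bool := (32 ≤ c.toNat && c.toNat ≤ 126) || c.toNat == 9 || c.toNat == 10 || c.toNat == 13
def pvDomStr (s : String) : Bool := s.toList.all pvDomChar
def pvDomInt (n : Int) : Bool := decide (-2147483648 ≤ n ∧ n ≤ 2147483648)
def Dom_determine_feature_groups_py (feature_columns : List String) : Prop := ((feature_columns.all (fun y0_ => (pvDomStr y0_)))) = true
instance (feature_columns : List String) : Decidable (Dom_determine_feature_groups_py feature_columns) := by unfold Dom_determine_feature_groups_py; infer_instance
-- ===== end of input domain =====

-- ===== PORT A =====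
-- B replaces A's two scans with one partitioning pass (same return values; A is total).
def pvIsKnown (col : String) : Bool :=
  PySem.Str.startswith col "hour_" || PySem.Str.startswith col "dow_" || PySem.Str.startswith col "session_"

def determine_feature_groups_py (feature_columns : List String) : List String × List String :=
  let known_future := feature_columns.filter (fun col => pvIsKnown col)
  let unknown := feature_columns.filter (fun col => !(known_future.contains col))
  (known_future, unknown)

-- ===== PORT B =====
def determine_feature_groups_py_alt (feature_columns : List String) : List String × List String :=
  feature_columns.foldl
    (fun acc col =>
      if pvIsKnown col then (acc.1 ++ [col], acc.2) else (acc.1, acc.2 ++ [col]))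
    ([], [])

-- ===== PRECONDITION & SPEC =====
def Spec_determine_feature_groups_py (feature_columns : List String) (out : List String × List String) : Prop := out = determine_feature_groups_py_alt feature_columns
instance (feature_columns : List String) (out : List String × List String) : Decidable (Spec_determine_feature_groups_py feature_columns out) := by unfold Spec_determine_feature_groups_py; infer_instance

-- ===== CLAIM (what is proved, stated in full; the proofs are below) =====
def Claim_equal_determine_feature_groups_py : Prop := ∀ (feature_columns : List String), Dom_determine_feature_groups_py feature_columns → Spec_determine_feature_groups_py feature_columns (determine_feature_groups_py feature_columns)

-- ===== LEMMAS AND PROOFS =====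

lemma pv_contains_filter (l : List String) (c : String) (h : c ∈ l) :
    (l.filter (fun col => pvIsKnown col)).contains c = pvIsKnown c := by
  cases hk : pvIsKnown c with
  | true => simp [List.contains_eq_mem, List.mem_filter, h, hk]
  | false => simp [List.contains_eq_mem, List.mem_filter, hk]

lemma pv_filter_not_contains (l l' : List String) (h : ∀ c ∈ l', c ∈ l) :
    l'.filter (fun col => !((l.filter (fun c => pvIsKnown c)).contains col))
      = l'.filter (fun col => !(pvIsKnown col)) := by
  apply List.filter_congr
  intro c hc
  rw [pv_contains_filter l c (h c hc)]

lemma pv_foldl_partition (l : List String) (a b : List String) :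
    l.foldl (fun acc col =>
        if pvIsKnown col then (acc.1 ++ [col], acc.2) else (acc.1, acc.2 ++ [col])) (a, b)
      = (a ++ l.filter (fun c => pvIsKnown c), b ++ l.filter (fun c => !(pvIsKnown c))) := by
  induction l generalizing a b with
  | nil => simp
  | cons x xs ih =>
    cases hk : pvIsKnown x <;> simp [List.foldl_cons, hk, ih]

-- ===== VERDICT (by name: the statement is the Claim_ definition above) =====
theorem determine_feature_groups_py_spec : Claim_equal_determine_feature_groups_py := by
  intro feature_columns _
  unfold Spec_determine_feature_groups_py determine_feature_groups_py determine_feature_groups_py_alt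
  rw [pv_foldl_partition]
  simp only []
  rw [pv_filter_not_contains feature_columns feature_columns (fun _ h => h)]
  simp
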